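-- pv_equiv track=rewrite | github.com/kla1mn/tochka-internship | run.py | check_capacity
-- ===== SOURCE A (Python) =====
-- def check_capacity(max_capacity: int, guests: list) -> bool:
--     """
--     Проверяет, можно ли разместить всех гостей в отеле.
--
--     :param max_capacity: Максимальная вместимость отеля.
--     :param guests: Список словарей с данными о гостях, каждый словарь должен содержать
--                     ключи 'check-in' и 'check-out' с датами в строковом формате.
--     :return: True, если все гости могут быть размещены, иначе False.
--     """
--     if max_capacity == 0:
--         return False
--     if not guests:
--         return True
--
--     ins_and_outs: list[tuple[str, str]] = []
--     for guest in guests: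
--         ins_and_outs.append((guest["check-in"], "in"))
--         ins_and_outs.append((guest["check-out"], "out"))
--
--     ins_and_outs.sort(key=lambda x: (x[0], x[1] == "in"))
--
--     guests_count = 0
--     for _, check_type in ins_and_outs:
--         if check_type == "in":
--             guests_count += 1
--             if guests_count > max_capacity:
--                 return False
--         else:
--             guests_count -= 1
--     return True
-- ===== SOURCE B (Python) =====
-- def check_capacity(max_capacity: int, guests: list) -> bool:
--     if max_capacity == 0:
--         return False
--     if not guests:
--         return True
--
--     ins = sorted(g["check-in"] for g in guests)
--     outs = sorted(g["check-out"] for g in guests)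
--
--     count = 0
--     j = 0
--     for t in ins:
--         while j < len(outs) and outs[j] <= t:
--             count -= 1
--             j += 1
--         count += 1
--         if count > max_capacity:
--             return False
--     return True
-- ===== Notes on version B (the rewrite author's own statement) =====
-- stated objective: alternative
-- what changed: Instead of building one tagged (date, 'in'/'out') event list, sorting it by a tuple key and sweeping it, B sorts the check-in and check-out dates separately and runs a two-pointer merge sweep (check-outs drained first at equal dates, matching A's tie-break).
import Mathlib
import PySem

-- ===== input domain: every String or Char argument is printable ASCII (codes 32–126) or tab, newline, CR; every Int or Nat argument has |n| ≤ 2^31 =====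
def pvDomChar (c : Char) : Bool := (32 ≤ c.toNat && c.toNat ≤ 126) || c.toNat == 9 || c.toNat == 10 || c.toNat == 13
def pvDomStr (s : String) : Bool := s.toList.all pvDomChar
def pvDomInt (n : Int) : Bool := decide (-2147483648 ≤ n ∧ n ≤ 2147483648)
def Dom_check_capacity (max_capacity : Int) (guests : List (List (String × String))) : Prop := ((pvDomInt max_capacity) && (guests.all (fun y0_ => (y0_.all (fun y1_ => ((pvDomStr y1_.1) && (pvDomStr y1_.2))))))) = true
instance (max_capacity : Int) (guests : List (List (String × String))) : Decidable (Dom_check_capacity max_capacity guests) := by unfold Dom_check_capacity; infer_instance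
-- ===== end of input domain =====

-- B replaces A's single tagged (date, "in"/"out") event list sorted by a tuple key with two
-- separately sorted date lists swept by a two-pointer merge (alternative algorithm, same cost).
-- ===== PORT A =====
-- A's final for-loop with its early `return False` (counts "in"/"out" events in sorted order)
def pvSweepA (maxc : Int) : List (String × String) → Int → Bool
  | [], _ => true
  | (_, t) :: rest, c =>
    if t == "in" then
      if c + 1 > maxc then false else pvSweepA maxc rest (c + 1)
    else pvSweepA maxc rest (c - 1)

def check_capacity (max_capacity : Int) (guests : List (List (String × String))) : Bool :=
  if max_capacity == 0 then false
  else if guests.isEmpty then true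
  else
    let ins_and_outs := guests.foldl (fun acc g =>
      acc ++ [((PySem.Dict.mk g).getD "check-in" "", "in"),
              ((PySem.Dict.mk g).getD "check-out" "", "out")]) []
    pvSweepA max_capacity
      (PySem.List.sorted2 ins_and_outs (fun x => x.1) (fun x => x.2 == "in")) 0

-- ===== PORT B =====
-- the inner `while j < len(outs) and outs[j] <= t` loop: drains due check-outs, decrementing
def pvDrain (t : String) : List String → Int → List String × Int
  | [], c => ([], c)
  | o :: os, c => if o ≤ t then pvDrain t os (c - 1) else (o :: os, c)

-- the outer `for t in ins` loop with its early `return False`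
def pvSweepB (maxc : Int) : List String → List String → Int → Bool
  | [], _, _ => true
  | t :: ins, outs, c =>
    let p := pvDrain t outs c
    if p.2 + 1 > maxc then false else pvSweepB maxc ins p.1 (p.2 + 1)

def check_capacity_alt (max_capacity : Int) (guests : List (List (String × String))) : Bool :=
  if max_capacity == 0 then false
  else if guests.isEmpty then true
  else
    let ins := PySem.List.sorted (guests.map (fun g => (PySem.Dict.mk g).getD "check-in" "")) (fun x => x)
    let outs := PySem.List.sorted (guests.map (fun g => (PySem.Dict.mk g).getD "check-out" "")) (fun x => x)
    pvSweepB max_capacity ins outs 0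

-- ===== PRECONDITION & SPEC =====
-- Pre_ excludes guest lists in which some guest dict lacks the "check-in" or "check-out" key
-- (Python A raises KeyError there), except when max_capacity == 0, where A returns before any lookup.
def Pre_check_capacity (max_capacity : Int) (guests : List (List (String × String))) : Prop :=
  max_capacity = 0 ∨ ∀ g ∈ guests,
    ((PySem.Dict.mk g).get? "check-in").isSome = true ∧ ((PySem.Dict.mk g).get? "check-out").isSome = true
instance (max_capacity : Int) (guests : List (List (String × String))) : Decidable (Pre_check_capacity max_capacity guests) := by unfold Pre_check_capacity; infer_instance

def pvWitness_check_capacity : Int × (List (List (String × String))) :=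
  (1, [[("check-in", "2020-01-01"), ("check-out", "2020-01-03")],
       [("check-in", "2020-01-03"), ("check-out", "2020-01-05")]])

def Spec_check_capacity (max_capacity : Int) (guests : List (List (String × String))) (out : Bool) : Prop := out = check_capacity_alt max_capacity guests
instance (max_capacity : Int) (guests : List (List (String × String))) (out : Bool) : Decidable (Spec_check_capacity max_capacity guests out) := by unfold Spec_check_capacity; infer_instance

-- ===== CLAIM (what is proved, stated in full; the proofs are below) =====
def Claim_equal_check_capacity : Prop := ∀ (max_capacity : Int) (guests : List (List (String × String))), Dom_check_capacity max_capacity guests → Pre_check_capacity max_capacity guests → Spec_check_capacity max_capacity guests (check_capacity max_capacity guests)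

-- ===== LEMMAS AND PROOFS =====

-- the combined sort key A uses, as a lexicographic pair
def pvK (x : String × String) : String ×ₗ Bool := toLex (x.1, x.2 == "in")
def pvKIn (d : String) : String ×ₗ Bool := toLex (d, true)
def pvKOut (d : String) : String ×ₗ Bool := toLex (d, false)

-- the common sweep, on the key sequence alone
def pvSweepK (maxc : Int) : List (String ×ₗ Bool) → Int → Bool
  | [], _ => true
  | k :: rest, c =>
    if (ofLex k).2 then
      if c + 1 > maxc then false else pvSweepK maxc rest (c + 1)
    else pvSweepK maxc rest (c - 1)

-- merge of the two sorted date lists, as the key sequence B effectively sweeps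
def pvMergeK : List String → List String → List (String ×ₗ Bool)
  | ins, [] => ins.map pvKIn
  | [], o :: os => pvKOut o :: pvMergeK [] os
  | t :: ins, o :: os =>
    if o ≤ t then pvKOut o :: pvMergeK (t :: ins) os
    else pvKIn t :: pvMergeK ins (o :: os)
termination_by ins outs => ins.length + outs.length

theorem pvSweepA_eq_sweepK (maxc : Int) (evs : List (String × String)) (c : Int) :
    pvSweepA maxc evs c = pvSweepK maxc (evs.map pvK) c := by
  induction evs generalizing c with
  | nil => rfl
  | cons x rest ih =>
    obtain ⟨d, t⟩ := x
    simp only [pvSweepA, List.map, pvSweepK, pvK, ofLex_toLex]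
    split_ifs <;> simp [ih]

theorem pvSorted2_eq_sorted_lex (evs : List (String × String)) :
    PySem.List.sorted2 evs (fun x => x.1) (fun x => x.2 == "in")
      = PySem.List.sorted evs pvK := by
  have hb : (fun (a b : String × String) =>
        decide (a.1 < b.1) || !decide (b.1 < a.1) && decide ((a.2 == "in") < (b.2 == "in")))
      = (fun a b => decide (pvK a < pvK b)) := by
    funext a b
    simp only [pvK]
    rw [Bool.eq_iff_iff]
    simp only [decide_eq_true_eq, Bool.or_eq_true, Bool.and_eq_true, Bool.not_eq_true',
      decide_eq_false_iff_not]
    rw [Prod.Lex.lt_iff]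
    simp only [ofLex_toLex]
    constructor
    · rintro (h | ⟨h1, h2⟩)
      · exact Or.inl h
      · rcases lt_trichotomy a.1 b.1 with h' | h' | h'
        · exact Or.inl h'
        · exact Or.inr ⟨h', h2⟩
        · exact absurd h' h1
    · rintro (h | ⟨h1, h2⟩)
      · exact Or.inl h
      · exact Or.inr ⟨fun hlt => absurd h1 (ne_of_gt hlt), h2⟩
  simp only [PySem.List.sorted2, PySem.List.sorted, if_neg (by decide : ¬ (false = true))]
  rw [hb]

theorem pvSweepB_eq_sweepK (maxc : Int) (ins outs : List String) (c : Int) :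
    pvSweepB maxc ins outs c = pvSweepK maxc (pvMergeK ins outs) c := by
  fun_induction pvMergeK ins outs generalizing c with
  | case1 ins =>
    induction ins generalizing c with
    | nil => rfl
    | cons t ins ih =>
      simp only [pvSweepB, pvDrain, List.map, pvSweepK, pvKIn, ofLex_toLex]
      split_ifs <;> simp [ih]
  | case2 o os ih =>
    simp only [pvSweepB, pvSweepK, pvKOut, ofLex_toLex]
    simpa [pvSweepB] using (ih (c - 1)).symm
  | case3 t ins o os hle ih =>
    simp only [pvSweepB, pvDrain, if_pos hle, pvSweepK, pvKOut, ofLex_toLex]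
    rw [← ih (c - 1)]
    simp [pvSweepB]
  | case4 t ins o os hle ih =>
    simp only [pvSweepB, pvDrain, if_neg hle, pvSweepK, pvKIn, ofLex_toLex]
    split_ifs <;> simp [ih]

theorem pvMergeK_perm (ins outs : List String) :
    (pvMergeK ins outs).Perm (ins.map pvKIn ++ outs.map pvKOut) := by
  fun_induction pvMergeK ins outs with
  | case1 ins => simp
  | case2 o os ih => simpa using ih.cons (pvKOut o)
  | case3 t ins o os hle ih =>
    refine ((ih.cons (pvKOut o)).trans ?_)
    exact (List.perm_middle).symm.trans (by simp)
  | case4 t ins o os hle ih => simpa using ih.cons (pvKIn t)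

theorem pvKOut_le_pvKIn (o t : String) : pvKOut o ≤ pvKIn t ↔ o ≤ t := by
  rw [pvKOut, pvKIn, Prod.Lex.le_iff]
  simp only [ofLex_toLex]
  constructor
  · rintro (h | ⟨h, -⟩)
    · exact le_of_lt h
    · exact le_of_eq h
  · intro h
    rcases lt_or_eq_of_le h with h | h
    · exact Or.inl h
    · exact Or.inr ⟨h, by simp⟩

theorem pvKOut_le_pvKOut (o o' : String) : pvKOut o ≤ pvKOut o' ↔ o ≤ o' := by
  rw [pvKOut, Prod.Lex.le_iff]
  simp only [ofLex_toLex]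
  constructor
  · rintro (h | ⟨h, -⟩)
    · exact le_of_lt h
    · exact le_of_eq h
  · intro h
    rcases lt_or_eq_of_le h with h | h
    · exact Or.inl h
    · exact Or.inr ⟨h, le_refl _⟩

theorem pvKIn_le_pvKIn (t t' : String) : pvKIn t ≤ pvKIn t' ↔ t ≤ t' := by
  rw [pvKIn, Prod.Lex.le_iff]
  simp only [ofLex_toLex]
  constructor
  · rintro (h | ⟨h, -⟩)
    · exact le_of_lt h
    · exact le_of_eq h
  · intro h
    rcases lt_or_eq_of_le h with h | h
    · exact Or.inl h
    · exact Or.inr ⟨h, le_refl _⟩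

theorem pvKIn_le_pvKOut (t o : String) : t < o → pvKIn t ≤ pvKOut o := by
  intro h
  rw [pvKIn, pvKOut, Prod.Lex.le_iff]
  exact Or.inl h

theorem pvMergeK_mem {z : String ×ₗ Bool} (ins outs : List String) :
    z ∈ pvMergeK ins outs → z ∈ ins.map pvKIn ∨ z ∈ outs.map pvKOut := by
  intro h
  have := (pvMergeK_perm ins outs).mem_iff.mp h
  simpa using this

theorem pvMergeK_pairwise (ins outs : List String)
    (hi : ins.Pairwise (· ≤ ·)) (ho : outs.Pairwise (· ≤ ·)) :
    (pvMergeK ins outs).Pairwise (· ≤ ·) := by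
  fun_induction pvMergeK ins outs with
  | case1 ins =>
    exact hi.map pvKIn (fun a b hab => (pvKIn_le_pvKIn a b).mpr hab)
  | case2 o os ih =>
    rw [List.pairwise_cons] at ho ⊢
    refine ⟨fun z hz => ?_, ih (by simp) ho.2⟩
    rcases pvMergeK_mem _ _ hz with h | h
    · simp at h
    · obtain ⟨o', ho', rfl⟩ := List.mem_map.mp h
      exact (pvKOut_le_pvKOut _ _).mpr (ho.1 o' ho')
  | case3 t ins o os hle ih =>
    rw [List.pairwise_cons] at ho
    refine List.pairwise_cons.mpr ⟨fun z hz => ?_, ih hi ho.2⟩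
    rcases pvMergeK_mem _ _ hz with h | h
    · obtain ⟨t', ht', rfl⟩ := List.mem_map.mp h
      refine (pvKOut_le_pvKIn _ _).mpr ?_
      rcases ht' with _ | ht'
      · exact hle
      · exact le_trans hle ((List.pairwise_cons.mp hi).1 t' (by assumption))
    · obtain ⟨o', ho', rfl⟩ := List.mem_map.mp h
      exact (pvKOut_le_pvKOut _ _).mpr (ho.1 o' ho')
  | case4 t ins o os hle ih =>
    rw [List.pairwise_cons] at hi
    refine List.pairwise_cons.mpr ⟨fun z hz => ?_, ih hi.2 ho⟩
    rcases pvMergeK_mem _ _ hz with h | h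
    · obtain ⟨t', ht', rfl⟩ := List.mem_map.mp h
      exact (pvKIn_le_pvKIn _ _).mpr (hi.1 t' ht')
    · obtain ⟨o', ho', rfl⟩ := List.mem_map.mp h
      refine pvKIn_le_pvKOut _ _ ?_
      have ht : t < o := lt_of_not_ge hle
      rcases ho' with _ | ho'
      · exact ht
      · exact lt_of_lt_of_le ht ((List.pairwise_cons.mp ho).1 o' (by assumption))

theorem pvMapK_sorted (evs : List (String × String)) :
    (PySem.List.sorted evs pvK).map pvK
      = PySem.List.sorted (evs.map pvK) (fun x => x) := by
  refine PySem.List.eq_of_perm_of_pairwise_le_of_injective (fun x => x) (fun _ _ h => h)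
    (((PySem.List.sorted_perm evs pvK false).map pvK).trans
      (PySem.List.sorted_perm (evs.map pvK) (fun x => x) false).symm)
    (PySem.List.sorted_map_key_pairwise evs pvK)
    (PySem.List.sorted_pairwise (evs.map pvK) (fun x => x))

theorem pvFlatMap_perm (f h : List (String × String) → String) (gs : List (List (String × String))) :
    ((gs.flatMap (fun g => [(f g, "in"), (h g, "out")])).map pvK).Perm
      ((gs.map f).map pvKIn ++ (gs.map h).map pvKOut) := by
  induction gs with
  | nil => simp
  | cons g gs ih =>
    simp only [List.flatMap_cons, List.map_append, List.map_cons, List.map_nil]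
    have h1 : pvK (f g, "in") = pvKIn (f g) := rfl
    have h2 : pvK (h g, "out") = pvKOut (h g) := rfl
    rw [h1, h2]
    simp only [List.cons_append]
    exact (((ih.cons (pvKOut (h g))).trans List.perm_middle.symm).cons (pvKIn (f g)))

-- ===== VERDICT (by name: the statement is the Claim_ definition above) =====
theorem check_capacity_spec : Claim_equal_check_capacity := by
  intro maxc guests _ _
  unfold Spec_check_capacity check_capacity check_capacity_alt
  by_cases h0 : maxc == 0
  · simp [h0]
  · simp only [h0, Bool.false_eq_true, if_false]
    by_cases hne : guests.isEmpty
    · simp [hne]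
    · simp only [hne, Bool.false_eq_true, if_false]
      set fin := fun g : List (String × String) => (PySem.Dict.mk g).getD "check-in" "" with hfin
      set fout := fun g : List (String × String) => (PySem.Dict.mk g).getD "check-out" "" with hfout
      have hev : guests.foldl (fun acc g => acc ++ [(fin g, "in"), (fout g, "out")]) []
          = guests.flatMap (fun g => [(fin g, "in"), (fout g, "out")]) := by
        simpa using PySem.List.foldl_append_eq_flatMap
          (fun g => [(fin g, "in"), (fout g, "out")]) guests []
      set evs := guests.flatMap (fun g => [(fin g, "in"), (fout g, "out")]) with hevs
      rw [hev, pvSorted2_eq_sorted_lex, pvSweepA_eq_sweepK, pvMapK_sorted,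
        pvSweepB_eq_sweepK]
      congr 1
      refine (PySem.List.eq_of_perm_of_pairwise_le_of_injective (fun x => x) (fun _ _ h => h)
        ?_ ?_ (PySem.List.sorted_pairwise (evs.map pvK) (fun x => x))).symm
      · refine (pvMergeK_perm _ _).trans ?_
        refine List.Perm.trans (List.Perm.append
          ((PySem.List.sorted_perm (guests.map fin) (fun x => x) false).map pvKIn)
          ((PySem.List.sorted_perm (guests.map fout) (fun x => x) false).map pvKOut)) ?_
        exact (pvFlatMap_perm fin fout guests).symm.trans
          (PySem.List.sorted_perm (evs.map pvK) (fun x => x) false).symm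
      · exact pvMergeK_pairwise _ _
          (PySem.List.sorted_pairwise (guests.map fin) (fun x => x))
          (PySem.List.sorted_pairwise (guests.map fout) (fun x => x))
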